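-- pv_equiv track=rewrite | github.com/vyalsgh-tech/my-timetable-next | tools/step47_toolbar_lovely_pink_icons.py | remove_method
-- ===== SOURCE A (Python) =====
-- def remove_method(text: str, method_name: str) -> str:
--     start = text.find(f"    def {method_name}(")
--     if start == -1:
--         return text
--     candidates = []
--     for marker in ["\n    def ", "\n    # ==========================================", "\nif __name__ == \"__main__\":"]:
--         pos = text.find(marker, start + 10)
--         if pos != -1:
--             candidates.append(pos)
--     if not candidates:
--         return text
--     end = min(candidates)
--     return text[:start] + text[end:]
-- ===== SOURCE B (Python) =====
-- def remove_method(text: str, method_name: str) -> str: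
--     start = text.find(f"    def {method_name}(")
--     if start == -1:
--         return text
--     markers = ("\n    def ", "\n    # ==========================================", "\nif __name__ == \"__main__\":")
--     i = start + 10
--     n = len(text)
--     while i < n:
--         if any(text.startswith(m, i) for m in markers):
--             return text[:start] + text[i:]
--         i += 1
--     return text
-- ===== Notes on version B (the rewrite author's own statement) =====
-- stated objective: alternative
-- what changed: A runs three separate whole-text find() passes (one per end marker) and takes the min of the hits; B does a single left-to-right scan from start+10 and stops at the first position where any of the three markers begins.
import Mathlib
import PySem

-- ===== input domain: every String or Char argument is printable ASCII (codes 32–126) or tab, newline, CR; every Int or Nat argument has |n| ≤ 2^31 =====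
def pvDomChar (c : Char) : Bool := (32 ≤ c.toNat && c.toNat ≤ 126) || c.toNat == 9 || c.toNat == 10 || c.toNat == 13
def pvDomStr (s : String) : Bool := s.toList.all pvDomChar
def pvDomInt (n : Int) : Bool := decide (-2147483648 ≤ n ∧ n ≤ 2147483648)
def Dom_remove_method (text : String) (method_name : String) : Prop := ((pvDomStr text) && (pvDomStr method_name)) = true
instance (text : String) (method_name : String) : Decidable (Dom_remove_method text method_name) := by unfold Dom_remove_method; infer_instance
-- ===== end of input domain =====

-- B replaces A's three whole-text find() passes plus min() by one merged left-to-right scan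
-- that stops at the first position where any end-marker starts (objective: alternative; same result).

-- ===== PORT A =====
-- A, literally: find the def header, then for each of the three markers find its first
-- occurrence from start+10, collect the hits, cut from start to the minimum hit.
def pvACore (s name : List Char) : List Char :=
  let start := PySem.Chars.find s ("    def ".toList ++ name ++ "(".toList)
  if start = -1 then s
  else
    let candidates :=
      ["\n    def ".toList, "\n    # ==========================================".toList,
       "\nif __name__ == \"__main__\":".toList].foldl
        (fun acc m =>
          let pos := PySem.Chars.findFrom s m (start + 10)
          if pos ≠ -1 then acc ++ [pos] else acc) []
    if candidates = [] then s
    else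
      match PySem.List.min? candidates (fun x => x) with
      | none => s
      | some e => PySem.List.slice s none (some start) ++ PySem.List.slice s (some e) none

def remove_method (text : String) (method_name : String) : String :=
  String.ofList (pvACore text.toList method_name.toList)

-- ===== PORT B =====
-- B's while loop: walk i over the positions from start+10, stop at the first i where some
-- marker starts (text.startswith(m, i) = m.isPrefixOf (drop i)); recursion on the suffix.
def pvScan (markers : List (List Char)) (s : List Char) (i : Nat) : Option Nat :=
  match s with
  | [] => none
  | c :: rest =>
      if markers.any (fun m => m.isPrefixOf (c :: rest)) then some i
      else pvScan markers rest (i + 1)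

def pvBCore (s name : List Char) : List Char :=
  let start := PySem.Chars.find s ("    def ".toList ++ name ++ "(".toList)
  if start = -1 then s
  else
    let markers := ["\n    def ".toList, "\n    # ==========================================".toList,
                    "\nif __name__ == \"__main__\":".toList]
    match pvScan markers (s.drop (start.toNat + 10)) (start.toNat + 10) with
    | some i => s.take start.toNat ++ s.drop i
    | none => s

def remove_method_alt (text : String) (method_name : String) : String :=
  String.ofList (pvBCore text.toList method_name.toList)

-- ===== PRECONDITION & SPEC =====
def Spec_remove_method (text : String) (method_name : String) (out : String) : Prop := out = remove_method_alt text method_name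
instance (text : String) (method_name : String) (out : String) : Decidable (Spec_remove_method text method_name out) := by unfold Spec_remove_method; infer_instance

-- ===== CLAIM (what is proved, stated in full; the proofs are below) =====
def Claim_equal_remove_method : Prop := ∀ (text : String) (method_name : String), Dom_remove_method text method_name → Spec_remove_method text method_name (remove_method text method_name)

-- ===== LEMMAS AND PROOFS =====

theorem pv_findFrom_past_len (s sub : List Char) (k : Nat) (h : s.length < k) :
    PySem.Chars.findFrom s sub (k : Int) = -1 := by
  unfold PySem.Chars.findFrom
  have h1 : ¬ ((k : Int) < 0) := by omega
  simp only [h1, if_false]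
  have h2 : ((s.length : Int) < (k : Int)) := by exact_mod_cast h
  simp [h2]

theorem pv_scan_none {M : List (List Char)} {t : List Char} {i : Nat}
    (hM : M.any (fun m => m.isPrefixOf ([] : List Char)) = false)
    (h : pvScan M t i = none) :
    ∀ j, M.any (fun m => m.isPrefixOf (t.drop j)) = false := by
  induction t generalizing i with
  | nil => intro j; simpa using hM
  | cons c rest ih =>
      intro j
      unfold pvScan at h
      by_cases hp : M.any (fun m => m.isPrefixOf (c :: rest)) = true
      · simp [hp] at h
      · simp only [Bool.not_eq_true] at hp
        simp only [hp, if_neg Bool.false_ne_true] at h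
        cases j with
        | zero => simpa using hp
        | succ j' => simpa using ih (i := i + 1) h j'

theorem pv_scan_some {M : List (List Char)} {t : List Char} {i r : Nat}
    (h : pvScan M t i = some r) :
    ∃ j, r = i + j ∧ M.any (fun m => m.isPrefixOf (t.drop j)) = true ∧
      ∀ l, l < j → M.any (fun m => m.isPrefixOf (t.drop l)) = false := by
  induction t generalizing i with
  | nil => simp [pvScan] at h
  | cons c rest ih =>
      unfold pvScan at h
      by_cases hp : M.any (fun m => m.isPrefixOf (c :: rest)) = true
      · refine ⟨0, ?_, by simpa using hp, by omega⟩
        simp [hp] at h; omega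
      · simp only [Bool.not_eq_true] at hp
        simp only [hp, if_neg Bool.false_ne_true] at h
        obtain ⟨j, hr, hPj, hmin⟩ := ih (i := i + 1) h
        refine ⟨j + 1, by omega, by simpa using hPj, ?_⟩
        intro l hl
        cases l with
        | zero => simpa using hp
        | succ l' => simpa using hmin l' (by omega)

-- no marker scan hit ⇒ every marker's findFrom from k is -1

theorem pv_none_case {M : List (List Char)} {s : List Char} {k : Nat}
    (hM : M.any (fun m => m.isPrefixOf ([] : List Char)) = false)
    (h : pvScan M (s.drop k) k = none) :
    ∀ m ∈ M, PySem.Chars.findFrom s m (k : Int) = -1 := by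
  intro m hm
  by_cases hk : k ≤ s.length
  · rw [PySem.Chars.findFrom_natCast_eq_neg_one_iff s m k hk]
    intro hinf
    obtain ⟨j, hj⟩ := (PySem.Chars.exists_prefix_drop_iff_isIn m (s.drop k)).mpr
      ((PySem.Chars.isIn_iff_infix m (s.drop k)).mpr hinf)
    have := pv_scan_none hM h j
    rw [List.any_eq_false] at this
    exact this m hm (List.isPrefixOf_iff_prefix.mpr hj)
  · exact pv_findFrom_past_len s m k (by omega)

-- scan hit at r ⇒ r is the min: every marker's findFrom is ≥ r, and some marker's is exactly r

theorem pv_some_case {M : List (List Char)} {s : List Char} {k r : Nat}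
    (h : pvScan M (s.drop k) k = some r) :
    (∀ m ∈ M, PySem.Chars.findFrom s m (k : Int) ≠ -1 → ((r : Int) ≤ PySem.Chars.findFrom s m (k : Int))) ∧
    (∃ m ∈ M, PySem.Chars.findFrom s m (k : Int) = (r : Int)) := by
  have hne : s.drop k ≠ [] := by intro he; rw [he] at h; simp [pvScan] at h
  have hk : k ≤ s.length := by
    by_contra hc; exact hne (List.drop_eq_nil_of_le (by omega))
  obtain ⟨j, hr, hPj, hmin⟩ := pv_scan_some h
  have hdrop : ∀ l : Nat, (s.drop k).drop l = s.drop (k + l) := by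
    intro l; simp [List.drop_drop]
  have part1 : ∀ m ∈ M, PySem.Chars.findFrom s m (k : Int) ≠ -1 →
      ((r : Int) ≤ PySem.Chars.findFrom s m (k : Int)) := by
    intro m hm hne'
    obtain ⟨h1, h2, h3⟩ := PySem.Chars.findFrom_natCast_spec s m k hk hne'
    set F := PySem.Chars.findFrom s m (k : Int) with hF
    by_contra hlt
    push Not at hlt
    have hF0 : 0 ≤ F := le_trans (by omega) h1
    have hFt : F = (F.toNat : Int) := (Int.toNat_of_nonneg hF0).symm
    have hkF : k ≤ F.toNat := by omega
    have hFr : F.toNat < r := by omega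
    have hl : F.toNat - k < j := by omega
    have := hmin (F.toNat - k) hl
    rw [List.any_eq_false] at this
    refine this m hm (List.isPrefixOf_iff_prefix.mpr ?_)
    rw [hdrop]
    have : k + (F.toNat - k) = F.toNat := by omega
    rw [this]; exact h2
  refine ⟨part1, ?_⟩
  rw [List.any_eq_true] at hPj
  obtain ⟨m0, hm0, hpre⟩ := hPj
  have hpre' : m0 <+: s.drop (k + j) := by
    rw [← hdrop]; exact List.isPrefixOf_iff_prefix.mp hpre
  have hne0 : PySem.Chars.findFrom s m0 (k : Int) ≠ -1 := by
    rw [Ne, PySem.Chars.findFrom_natCast_eq_neg_one_iff s m0 k hk]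
    intro hninf
    exact hninf ((PySem.Chars.isIn_iff_infix m0 (s.drop k)).mp
      ((PySem.Chars.exists_prefix_drop_iff_isIn m0 (s.drop k)).mp ⟨j, by rw [hdrop]; exact hpre'⟩))
  obtain ⟨h1, h2, h3⟩ := PySem.Chars.findFrom_natCast_spec s m0 k hk hne0
  refine ⟨m0, hm0, ?_⟩
  set F := PySem.Chars.findFrom s m0 (k : Int) with hF
  have hge := part1 m0 hm0 hne0
  have hF0 : 0 ≤ F := le_trans (by omega) h1
  have hFt : F = (F.toNat : Int) := (Int.toNat_of_nonneg hF0).symm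
  have hle : F.toNat ≤ k + j := by
    by_contra hc
    exact h3 (k + j) (by omega) (by omega) hpre'
  omega

theorem pv_core_eq (s name : List Char) : pvACore s name = pvBCore s name := by
  unfold pvACore pvBCore
  by_cases hfind : PySem.Chars.find s ("    def ".toList ++ name ++ "(".toList) = -1
  · rw [if_pos hfind, if_pos hfind]
  · rw [if_neg hfind, if_neg hfind]
    set M : List (List Char) := ["\n    def ".toList, "\n    # ==========================================".toList,
                    "\nif __name__ == \"__main__\":".toList] with hM
    have hMnil : M.any (fun m => m.isPrefixOf ([] : List Char)) = false := by decide
    have h0 : 0 ≤ PySem.Chars.find s ("    def ".toList ++ name ++ "(".toList) := by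
      have := PySem.Chars.neg_one_le_find s ("    def ".toList ++ name ++ "(".toList)
      omega
    set f := PySem.Chars.find s ("    def ".toList ++ name ++ "(".toList) with hf
    obtain ⟨n, hn⟩ : ∃ n : Nat, f = (n : Int) := ⟨f.toNat, (Int.toNat_of_nonneg h0).symm⟩
    have hc1 : f + 10 = ((n + 10 : Nat) : Int) := by rw [hn]; push_cast; ring
    have hc2 : f.toNat + 10 = n + 10 := by rw [hn]; simp
    rw [hc1, hc2]
    have hC : M.foldl
        (fun acc m =>
          let pos := PySem.Chars.findFrom s m ((n + 10 : Nat) : Int)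
          if pos ≠ -1 then acc ++ [pos] else acc) [] =
        (M.filter (fun m => decide (PySem.Chars.findFrom s m ((n + 10 : Nat) : Int) ≠ -1))).map
          (fun m => PySem.Chars.findFrom s m ((n + 10 : Nat) : Int)) := by
      simpa using PySem.List.foldl_append_ite
        (fun m => PySem.Chars.findFrom s m ((n + 10 : Nat) : Int) ≠ -1)
        (fun m => PySem.Chars.findFrom s m ((n + 10 : Nat) : Int)) M []
    rw [hC]
    cases hscan : pvScan M (s.drop (n + 10)) (n + 10) with
    | none =>
        have hall := pv_none_case hMnil hscan
        have : M.filter (fun m => decide (PySem.Chars.findFrom s m ((n + 10 : Nat) : Int) ≠ -1)) = [] := by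
          rw [List.filter_eq_nil_iff]
          intro m hm
          have hh := hall m hm
          simp only [Bool.not_eq_true, decide_eq_false_iff_not, not_not]
          exact hh
        rw [this]
        simp [hscan]
    | some r =>
        obtain ⟨part1, m0, hm0, hF0⟩ := pv_some_case hscan
        have hmemC : ((r : Int)) ∈ (M.filter (fun m => decide (PySem.Chars.findFrom s m ((n + 10 : Nat) : Int) ≠ -1))).map
            (fun m => PySem.Chars.findFrom s m ((n + 10 : Nat) : Int)) := by
          rw [List.mem_map]
          exact ⟨m0, List.mem_filter.mpr ⟨hm0, by rw [decide_eq_true_iff, hF0]; omega⟩, hF0⟩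
        have hCne : (M.filter (fun m => decide (PySem.Chars.findFrom s m ((n + 10 : Nat) : Int) ≠ -1))).map
            (fun m => PySem.Chars.findFrom s m ((n + 10 : Nat) : Int)) ≠ [] := by
          intro he; rw [he] at hmemC; simp at hmemC
        rw [if_neg hCne]
        obtain ⟨e, he⟩ : ∃ e, PySem.List.min? ((M.filter (fun m => decide (PySem.Chars.findFrom s m ((n + 10 : Nat) : Int) ≠ -1))).map
            (fun m => PySem.Chars.findFrom s m ((n + 10 : Nat) : Int))) (fun x => x) = some e := by
          cases hmq : PySem.List.min? ((M.filter (fun m => decide (PySem.Chars.findFrom s m ((n + 10 : Nat) : Int) ≠ -1))).map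
            (fun m => PySem.Chars.findFrom s m ((n + 10 : Nat) : Int))) (fun x => x) with
          | none => exact absurd ((PySem.List.min?_eq_none_iff _ _).mp hmq) hCne
          | some e => exact ⟨e, rfl⟩
        rw [he]
        have hemem := PySem.List.min?_mem he
        have hele : e ≤ (r : Int) := PySem.List.min?_isMin he _ hmemC
        have hege : (r : Int) ≤ e := by
          rw [List.mem_map] at hemem
          obtain ⟨m, hmf, hme⟩ := hemem
          rw [List.mem_filter] at hmf
          exact hme ▸ part1 m hmf.1 (of_decide_eq_true hmf.2)
        have hedef : e = (r : Int) := le_antisymm hele hege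
        rw [hedef]
        simp [hscan, hn, PySem.List.slice_to_natCast, PySem.List.slice_from_natCast]

-- ===== VERDICT (by name: the statement is the Claim_ definition above) =====
theorem remove_method_spec : Claim_equal_remove_method := by
  intro text method_name _
  unfold Spec_remove_method remove_method remove_method_alt
  rw [pv_core_eq]
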